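-- pv_equiv track=rewrite | github.com/Bismarrck/kcon | kcnn/utils.py | get_atoms_from_kbody_term
-- ===== SOURCE A (Python) =====
-- def get_atoms_from_kbody_term(kbody_term):
--   """
--   Return the atoms in the given k-body term.
--
--   Args:
--     kbody_term: a `str` as the k-body term.
--
--   Returns:
--     atoms: a `list` of `str` as the chemical symbols of the atoms.
--
--   """
--   sel = [0]
--   for i in range(len(kbody_term)):
--     if kbody_term[i].isupper():
--       sel.append(i + 1)
--     else:
--       sel[-1] += 1
--   atoms = []
--   for i in range(len(sel) - 1):
--     atoms.append(kbody_term[sel[i]: sel[i + 1]])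
--   return atoms
-- ===== SOURCE B (Python) =====
-- def get_atoms_from_kbody_term(kbody_term):
--   """Single forward pass: split at uppercase letters, dropping any leading
--   characters before the first uppercase one."""
--   atoms = []
--   current = None
--   for ch in kbody_term:
--     if ch.isupper():
--       if current is not None:
--         atoms.append(current)
--       current = ch
--     elif current is not None:
--       current += ch
--   if current is not None:
--     atoms.append(current)
--   return atoms
-- ===== Notes on version B (the rewrite author's own statement) =====
-- stated objective: idiomatic
-- what changed: B does one forward pass accumulating the current symbol directly (None until the first uppercase char) instead of A's two passes that first build an offset boundary table `sel` and then slice the string between consecutive boundaries.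
import Mathlib
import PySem

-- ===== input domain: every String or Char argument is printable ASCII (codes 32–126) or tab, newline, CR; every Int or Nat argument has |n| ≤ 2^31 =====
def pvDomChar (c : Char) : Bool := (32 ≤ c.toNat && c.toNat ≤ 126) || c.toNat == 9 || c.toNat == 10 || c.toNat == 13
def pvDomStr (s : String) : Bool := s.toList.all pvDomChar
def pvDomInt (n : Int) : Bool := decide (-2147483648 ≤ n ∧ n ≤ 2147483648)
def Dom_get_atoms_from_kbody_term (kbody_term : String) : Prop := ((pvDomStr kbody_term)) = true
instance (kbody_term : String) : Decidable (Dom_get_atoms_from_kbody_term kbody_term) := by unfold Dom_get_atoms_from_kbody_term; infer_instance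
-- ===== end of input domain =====

-- B is a single forward pass with a `current` accumulator instead of A's boundary
-- table + slicing (objective: more idiomatic decomposition, same cost).
-- Strings are handled as their char lists (exact: slicing/indexing a Python str
-- is slicing/indexing its character sequence).

-- ===== PORT A =====
-- one step of A's first loop: `if s[i].isupper(): sel.append(i+1) else: sel[-1] += 1`
-- (`sel[-1] += 1` transliterated as dropLast ++ [last + 1]; sel is always nonempty)
def aStep (sel : List Int) (ic : Int × Char) : List Int :=
  if PySem.Chars.isupper ic.2 then sel ++ [ic.1 + 1]
  else sel.dropLast ++ [sel.getLastD 0 + 1]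

-- `for i in range(len(s)): … s[i] …` ported as a fold over enumerate(s, 0)
-- (exact: i ranges over exactly the indices of s, paired with the char s[i])
def get_atoms_from_kbody_term (kbody_term : String) : List String :=
  let cs := kbody_term.toList
  let sel : List Int := (PySem.List.enumerate cs 0).foldl aStep [0]
  let atoms : List (List Char) :=
    (PySem.List.pyRange 0 ((sel.length : Int) - 1) 1).foldl
      (fun atoms i =>
        atoms ++ [PySem.List.slice cs (some (PySem.List.pyGetD sel i 0))
                                      (some (PySem.List.pyGetD sel (i + 1) 0))]) []
  atoms.map String.ofList

-- ===== PORT B =====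
-- one step of B's loop over the chars: state = (atoms so far, optional current symbol)
def bStep (st : List (List Char) × Option (List Char)) (c : Char) :
    List (List Char) × Option (List Char) :=
  if PySem.Chars.isupper c then
    ((match st.2 with | none => st.1 | some g => st.1 ++ [g]), some [c])
  else
    match st.2 with
    | none => st
    | some g => (st.1, some (g ++ [c]))

-- B's trailing `if current is not None: atoms.append(current)`
def bFinish (st : List (List Char) × Option (List Char)) : List (List Char) :=
  match st.2 with | none => st.1 | some g => st.1 ++ [g]

def get_atoms_from_kbody_term_alt (kbody_term : String) : List String :=
  (bFinish (kbody_term.toList.foldl bStep ([], none))).map String.ofList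

-- ===== PRECONDITION & SPEC =====
def Spec_get_atoms_from_kbody_term (kbody_term : String) (out : List String) : Prop := out = get_atoms_from_kbody_term_alt kbody_term
instance (kbody_term : String) (out : List String) : Decidable (Spec_get_atoms_from_kbody_term kbody_term out) := by unfold Spec_get_atoms_from_kbody_term; infer_instance

-- ===== CLAIM (what is proved, stated in full; the proofs are below) =====
def Claim_equal_get_atoms_from_kbody_term : Prop := ∀ (kbody_term : String), Dom_get_atoms_from_kbody_term kbody_term → Spec_get_atoms_from_kbody_term kbody_term (get_atoms_from_kbody_term kbody_term)

-- ===== LEMMAS AND PROOFS =====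

-- closed form of A's first loop from start index i: upper-case positions, then end index
def tailSel (cs : List Char) (i : Int) : List Int :=
  match cs with
  | [] => [i]
  | c :: cs => (if PySem.Chars.isupper c then [i] else []) ++ tailSel cs (i + 1)

lemma aFold_eq (cs : List Char) : ∀ (i : Int) (front : List Int),
    (PySem.List.enumerate cs i).foldl aStep (front ++ [i]) = front ++ tailSel cs i := by
  induction cs with
  | nil => intro i front; simp [PySem.List.enumerate, tailSel]
  | cons c cs ih =>
    intro i front
    rw [PySem.List.enumerate_cons]
    simp only [List.foldl_cons, tailSel, aStep]
    by_cases h : PySem.Chars.isupper c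
    · simp only [h, if_pos]
      have := ih (i + 1) (front ++ [i])
      simpa using this
    · simp only [h, if_neg, Bool.false_eq_true, not_false_iff]
      have h1 : (front ++ [i]).dropLast = front := by simp
      have h2 : (front ++ [i]).getLastD 0 = i := by simp
      rw [h1, h2, ih (i + 1) front]
      simp

-- generic: a foldl appending singletons is map
lemma foldl_append_singleton {α β : Type} (f : α → β) :
    ∀ (l : List α) (init : List β),
    l.foldl (fun acc x => acc ++ [f x]) init = init ++ l.map f := by
  intro l
  induction l with
  | nil => simp
  | cons x l ih => intro init; simp [ih]

lemma pyGetD_cons_succ (x : Int) (xs : List Int) (k : Nat) (d : Int) :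
    PySem.List.pyGetD (x :: xs) ((k : Int) + 1) d = PySem.List.pyGetD xs (k : Int) d := by
  simp only [PySem.List.pyGetD, PySem.List.pyGet?, PySem.List.pyIdx?]
  rw [if_pos (by positivity : (0:Int) ≤ (k:Int) + 1), if_pos (by positivity : (0:Int) ≤ (k:Int))]
  by_cases h : (k:Int) < (xs.length : Int)
  · rw [if_pos (by simp; omega : ((k:Int)+1) < (((x::xs).length : Nat):Int)), if_pos h]
    have hk : ((k:Int)+1).toNat = k + 1 := by omega
    simp [hk]
  · rw [if_neg (by simp; omega), if_neg h]
    simp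

lemma pyGetD_cons_zero (x : Int) (xs : List Int) (d : Int) :
    PySem.List.pyGetD (x :: xs) 0 d = x := by
  simp [PySem.List.pyGetD, PySem.List.pyGet?, PySem.List.pyIdx?]

lemma rangePairsAux {α : Type} (f : Int → Int → α) :
    ∀ (L : List Int),
    (List.range (L.length - 1)).map
      (fun k : Nat => f (PySem.List.pyGetD L (k : Int) 0) (PySem.List.pyGetD L ((k : Int) + 1) 0))
      = List.zipWith f L L.tail := by
  intro L
  induction L with
  | nil => simp
  | cons a L ih =>
    cases L with
    | nil => simp
    | cons b L =>
      simp only [List.length_cons, Nat.add_sub_cancel, List.range_succ_eq_map,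
        List.map_cons, List.map_map]
      have h0 : f (PySem.List.pyGetD (a :: b :: L) ((0 : Nat) : Int) 0)
          (PySem.List.pyGetD (a :: b :: L) (((0 : Nat) : Int) + 1) 0) = f a b := by
        have e : (((0:Nat):Int) + 1) = ((0:Nat):Int) + 1 := rfl
        rw [show (((0:Nat):Int)) = (0:Int) by simp, pyGetD_cons_zero,
          show ((0:Int) + 1) = ((0:Nat):Int) + 1 by simp, pyGetD_cons_succ,
          show (((0:Nat)):Int) = (0:Int) by simp, pyGetD_cons_zero]
      have hshift : ∀ k : Nat,
          ((fun k : Nat => f (PySem.List.pyGetD (a :: b :: L) (k : Int) 0)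
              (PySem.List.pyGetD (a :: b :: L) ((k : Int) + 1) 0)) ∘ Nat.succ) k
          = f (PySem.List.pyGetD (b :: L) ((k : Int)) 0)
              (PySem.List.pyGetD (b :: L) ((k : Int) + 1) 0) := by
        intro k
        simp only [Function.comp]
        rw [show ((k.succ : Nat) : Int) = (k : Int) + 1 by push_cast; ring,
          pyGetD_cons_succ,
          show ((k : Int) + 1 + 1) = (((k + 1 : Nat)) : Int) + 1 by push_cast; ring,
          pyGetD_cons_succ]
        push_cast
        ring_nf
      rw [List.map_congr_left (fun k _ => hshift k)]
      simp only [List.length_cons, Nat.add_sub_cancel] at ih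
      rw [ih]
      rw [h0]
      simp

-- A's second loop (indexed over pyRange) is zipWith over consecutive boundaries
lemma range_pairs {α : Type} (f : Int → Int → α) (L : List Int) :
    (PySem.List.pyRange 0 ((L.length : Int) - 1) 1).map
      (fun i => f (PySem.List.pyGetD L i 0) (PySem.List.pyGetD L (i + 1) 0))
      = List.zipWith f L L.tail := by
  cases L with
  | nil =>
    rw [show ((([]:List Int).length : Int) - 1) = (-1 : Int) by simp]
    rw [PySem.List.pyRange_one]
    simp
  | cons a L =>
    rw [show (((a :: L).length : Int) - 1) = ((L.length : Nat) : Int) by simp,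
      PySem.List.pyRange_zero_natCast, List.map_map]
    exact rangePairsAux f (a :: L)

-- B's fold while inside a group that started at index j
lemma bFold_some (full : List Char) : ∀ (cs : List Char) (i : Nat)
    (h : full.drop i = cs) (acc : List (List Char)) (j : Nat) (hj : j ≤ i),
    bFinish (cs.foldl bStep (acc, some ((full.drop j).take (i - j))))
    = acc ++ List.zipWith (fun a b => PySem.List.slice full (some a) (some b))
        ((j : Int) :: tailSel cs (i : Int)) (tailSel cs (i : Int)) := by
  intro cs
  induction cs with
  | nil =>
    intro i _ acc j _
    simp only [List.foldl_nil, bFinish, tailSel, List.zipWith_cons_cons, List.zipWith_nil_right]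
    rw [PySem.List.slice_natCast]
  | cons c cs ih =>
    intro i h acc j hj
    have hdrop1 : full.drop (i + 1) = cs := by
      have : full.drop (i + 1) = (full.drop i).drop 1 := by
        rw [List.drop_drop]
      rw [this, h]; simp
    have hgetc : full[i]? = some c := by
      have h0 : (full.drop i)[0]? = full[i + 0]? := List.getElem?_drop
      rw [h] at h0
      simpa using h0.symm
    simp only [List.foldl_cons, bStep, tailSel]
    by_cases hc : PySem.Chars.isupper c
    · simp only [hc, if_pos]
      have htake1 : (full.drop i).take ((i + 1) - i) = [c] := by
        rw [h]; simp [show i + 1 - i = 1 by omega]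
      have := ih (i + 1) hdrop1 (acc ++ [(full.drop j).take (i - j)]) i (by omega)
      rw [show (i + 1) - i = 1 by omega] at this
      rw [show (full.drop i).take 1 = [c] by rw [h]; simp] at this
      rw [this]
      rw [show (((i+1) : Nat) : Int) = ((i:Nat):Int) + 1 by push_cast; ring]
      simp only [List.singleton_append, List.zipWith_cons_cons]
      rw [PySem.List.slice_natCast]
      simp
    · simp only [hc, if_neg, Bool.false_eq_true, not_false_iff]
      have hext : (full.drop j).take (i - j) ++ [c] = (full.drop j).take ((i + 1) - j) := by
        rw [show (i + 1) - j = (i - j) + 1 by omega, List.take_add_one]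
        congr 1
        have : (full.drop j)[i - j]? = full[j + (i - j)]? := by
          rw [List.getElem?_drop]
        rw [this, show j + (i - j) = i by omega, hgetc]
        rfl
      rw [hext]
      have := ih (i + 1) hdrop1 acc j (by omega)
      rw [this]
      rw [show (((i+1) : Nat) : Int) = ((i:Nat):Int) + 1 by push_cast; ring]
      simp

-- B's fold before the first upper-case char
lemma bFold_none (full : List Char) : ∀ (cs : List Char) (i : Nat)
    (h : full.drop i = cs),
    bFinish (cs.foldl bStep ([], none))
    = List.zipWith (fun a b => PySem.List.slice full (some a) (some b))
        (tailSel cs (i : Int)) (tailSel cs (i : Int)).tail := by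
  intro cs
  induction cs with
  | nil => intro i _; simp [bFinish, tailSel]
  | cons c cs ih =>
    intro i h
    have hdrop1 : full.drop (i + 1) = cs := by
      have : full.drop (i + 1) = (full.drop i).drop 1 := by
        rw [List.drop_drop]
      rw [this, h]; simp
    simp only [List.foldl_cons, bStep, tailSel]
    by_cases hc : PySem.Chars.isupper c
    · simp only [hc, if_pos]
      have := bFold_some full cs (i + 1) hdrop1 [] i (by omega)
      rw [show (i + 1) - i = 1 by omega] at this
      rw [show (full.drop i).take 1 = [c] by rw [h]; simp] at this
      rw [this]
      rw [show (((i+1) : Nat) : Int) = ((i:Nat):Int) + 1 by push_cast; ring]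
      simp
    · simp only [hc, if_neg, Bool.false_eq_true, not_false_iff]
      rw [ih (i + 1) hdrop1]
      rw [show (((i+1) : Nat) : Int) = ((i:Nat):Int) + 1 by push_cast; ring]
      simp

-- ===== VERDICT (by name: the statement is the Claim_ definition above) =====
theorem get_atoms_from_kbody_term_spec : Claim_equal_get_atoms_from_kbody_term := by
  intro s _
  unfold Spec_get_atoms_from_kbody_term
  unfold get_atoms_from_kbody_term get_atoms_from_kbody_term_alt
  simp only []
  have hsel : (PySem.List.enumerate s.toList 0).foldl aStep [0] = tailSel s.toList 0 := by
    have := aFold_eq s.toList 0 []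
    simpa using this
  rw [hsel]
  rw [foldl_append_singleton
    (fun i => PySem.List.slice s.toList
      (some (PySem.List.pyGetD (tailSel s.toList 0) i 0))
      (some (PySem.List.pyGetD (tailSel s.toList 0) (i + 1) 0)))]
  rw [List.nil_append]
  rw [range_pairs (fun a b => PySem.List.slice s.toList (some a) (some b)) (tailSel s.toList 0)]
  have := bFold_none s.toList s.toList 0 (by simp)
  rw [show (((0:Nat)):Int) = (0:Int) by simp] at this
  rw [this]
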